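-- pv_equiv track=rewrite | github.com/Mondego/pyreco | repoData/mgaitan-sublime-rst-completion/allPythonContent.py | split_row_into_lines
-- ===== SOURCE A (Python) =====
-- def split_row_into_lines(row):
--     row = [field.split('\n') for field in row]
--     height = max([len(field_lines) for field_lines in row])
--     turn_table = []
--     for i in range(height):
--         fields = []
--         for field_lines in row:
--             if i < len(field_lines):
--                 fields.append(field_lines[i])
--             else:
--                 fields.append('')
--         turn_table.append(fields)
--     return turn_table
-- ===== SOURCE B (Python) =====
-- def split_row_into_lines(row):
--     rows = [field.split('\n') for field in row]
--     height = max(len(r) for r in rows)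
--     padded = [r + [''] * (height - len(r)) for r in rows]
--     return [list(col) for col in zip(*padded)]
-- ===== Notes on version B (the rewrite author's own statement) =====
-- stated objective: idiomatic
-- what changed: A's per-cell index-bounds double loop is replaced by a padding pass (pad every split field to the common height with '') followed by a library transpose zip(*padded).
import Mathlib
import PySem

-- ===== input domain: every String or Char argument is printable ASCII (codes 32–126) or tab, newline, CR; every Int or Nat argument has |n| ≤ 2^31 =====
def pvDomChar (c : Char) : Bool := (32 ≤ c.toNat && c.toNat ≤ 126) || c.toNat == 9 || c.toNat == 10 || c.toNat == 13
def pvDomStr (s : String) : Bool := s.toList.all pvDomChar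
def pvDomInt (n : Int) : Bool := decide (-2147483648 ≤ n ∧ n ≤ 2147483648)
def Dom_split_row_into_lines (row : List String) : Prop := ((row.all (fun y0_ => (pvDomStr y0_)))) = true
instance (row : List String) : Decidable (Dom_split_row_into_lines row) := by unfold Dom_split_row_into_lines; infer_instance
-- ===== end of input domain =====

-- B replaces A's per-cell index-bounds double loop by a padding pass plus a zip(*...)
-- transpose — same values, a differently decomposed (more idiomatic) implementation.

-- ===== PORT A =====
-- field.split('\n'): '\n' ≠ '', so PySem.Str.split? always returns some; .getD [] is never hit
def pvSplitNL (s : String) : List String := (PySem.Str.split? s "\n").getD []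

def split_row_into_lines (row : List String) : List (List String) :=
  let rows := row.map pvSplitNL
  match PySem.List.max? (rows.map (fun fl => (fl.length : Int))) (fun x => x) with
  | none => []  -- Python raises ValueError here (max of empty); excluded by Pre_
  | some height =>
    (PySem.List.pyRange 0 height 1).foldl (fun tt i =>
      tt ++ [rows.foldl (fun fs fl =>
        fs ++ [if i < (fl.length : Int) then PySem.List.pyGetD fl i "" else ""]) []]) []
      -- under the guard 0 ≤ i < len, pyGetD fl i "" is exactly field_lines[i]

-- ===== PORT B =====
-- zip(*padded) over the rectangular 'padded' (every list has length = height):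
-- one output row per step, heads then tails, height times
def pvZipCols : Nat → List (List String) → List (List String)
  | 0, _ => []
  | n + 1, ls => (ls.map (fun l => l.headD "")) :: pvZipCols n (ls.map List.tail)

def split_row_into_lines_alt (row : List String) : List (List String) :=
  let rows := row.map pvSplitNL
  match PySem.List.max? (rows.map (fun fl => (fl.length : Int))) (fun x => x) with
  | none => []  -- Python raises ValueError here (max of empty generator); excluded by Pre_
  | some height =>
    let padded := rows.map (fun r => r ++ List.replicate (height.toNat - r.length) "")
    pvZipCols height.toNat padded

-- ===== PRECONDITION & SPEC =====
-- Pre_ excludes only the empty row, on which both A and B raise ValueError (max() of empty sequence)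
def Pre_split_row_into_lines (row : List String) : Prop := row ≠ []
instance (row : List String) : Decidable (Pre_split_row_into_lines row) := by unfold Pre_split_row_into_lines; infer_instance
def pvWitness_split_row_into_lines : List String := ["a\nb", "c"]

def Spec_split_row_into_lines (row : List String) (out : List (List String)) : Prop := out = split_row_into_lines_alt row
instance (row : List String) (out : List (List String)) : Decidable (Spec_split_row_into_lines row out) := by unfold Spec_split_row_into_lines; infer_instance

-- ===== CLAIM (what is proved, stated in full; the proofs are below) =====
def Claim_equal_split_row_into_lines : Prop := ∀ (row : List String), Dom_split_row_into_lines row → Pre_split_row_into_lines row → Spec_split_row_into_lines row (split_row_into_lines row)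

-- ===== LEMMAS AND PROOFS =====

-- getD through a tail shifts the index
theorem pv_getD_tail (l : List String) (k : Nat) :
    l.tail.getD k "" = l.getD (k + 1) "" := by
  cases l <;> simp [List.getD]

-- headD is getD 0
theorem pv_headD_eq_getD (l : List String) : l.headD "" = l.getD 0 "" := by
  cases l <;> simp [List.getD]

-- zip(*ls) in canonical form: k-th output row collects the k-th entries (default "")
theorem pv_zipCols_eq (n : Nat) (ls : List (List String)) :
    pvZipCols n ls = (List.range n).map (fun k => ls.map (fun l => l.getD k "")) := by
  induction n generalizing ls with
  | zero => simp [pvZipCols]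
  | succ n ih =>
    rw [List.range_succ_eq_map]
    simp only [pvZipCols, ih, List.map_cons, List.map_map, Function.comp_def]
    congr 1
    · exact List.map_congr_left (fun l _ => pv_headD_eq_getD l)
    · apply List.map_congr_left
      intro k _
      exact List.map_congr_left (fun l _ => pv_getD_tail l k)

-- padding with "" does not change getD with default ""
theorem pv_getD_pad (r : List String) (m k : Nat) :
    (r ++ List.replicate m "").getD k "" = r.getD k "" := by
  simp only [List.getD_eq_getElem?_getD, List.getElem?_append]
  split
  · rfl
  · rename_i hk
    rw [List.getElem?_eq_none (by omega : r.length ≤ k)]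
    simp [List.getElem?_replicate]
    split <;> simp

-- A's inner guarded lookup is getD
theorem pv_cell_eq (fl : List String) (k : Nat) :
    (if (k : Int) < (fl.length : Int) then PySem.List.pyGetD fl (k : Int) "" else "")
      = fl.getD k "" := by
  rw [PySem.List.pyGetD_natCast]
  by_cases h : k < fl.length
  · rw [if_pos (by exact_mod_cast h)]
  · rw [if_neg (by exact_mod_cast h)]
    simp [List.getD_eq_getElem?_getD, List.getElem?_eq_none (Nat.le_of_not_lt h)]

-- ===== VERDICT (by name: the statement is the Claim_ definition above) =====
theorem split_row_into_lines_spec : Claim_equal_split_row_into_lines := by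
  intro row _hdom hpre
  unfold Spec_split_row_into_lines split_row_into_lines split_row_into_lines_alt
  cases hmax : PySem.List.max? ((row.map pvSplitNL).map (fun fl => (fl.length : Int))) (fun x => x) with
  | none =>
    exfalso
    have := (PySem.List.max?_eq_none_iff _ _).mp hmax
    simp at this
    exact hpre this
  | some h =>
    have hmem : h ∈ (row.map pvSplitNL).map (fun fl => (fl.length : Int)) :=
      PySem.List.max?_mem hmax
    have h0 : 0 ≤ h := by
      simp only [List.mem_map] at hmem
      obtain ⟨fl, -, rfl⟩ := hmem
      exact Int.natCast_nonneg _
    obtain ⟨n, rfl⟩ := Int.eq_ofNat_of_zero_le h0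
    simp only [hmax, Int.toNat_natCast]
    rw [PySem.List.foldl_append_singleton_eq_map, List.nil_append,
        PySem.List.pyRange_zero_natCast, List.map_map, pv_zipCols_eq, List.map_map]
    apply List.map_congr_left
    intro k _
    simp only [Function.comp_def]
    rw [PySem.List.foldl_append_singleton_eq_map, List.nil_append, List.map_map, List.map_map]
    apply List.map_congr_left
    intro fl _
    simp only [Function.comp_def]
    rw [pv_getD_pad, pv_cell_eq]
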